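-- pv_equiv track=rewrite | github.com/pravindkk/MDP | algo/AlgoTask1.py | count_repeated_commands
-- ===== SOURCE A (Python) =====
-- def count_repeated_commands(action):
--     # Initialize an empty list to store the modified action
--     modified_action = []
--     # Initialize the previous command and its count
--     prev_command = None
--     count = 0
--
--     # Iterate over the action list
--     for command in action:
--         # If the current command is the same as the previous one, increment the count
--         if command in ['FW', 'BW'] and command == prev_command:
--             count += 1
--         else:
--             # If the previous command is not None and not 'SNAP' or 'STOP', append it with its count to the modified action
--             if prev_command is not None and prev_command != 'STOP' and not prev_command.startswith('SNAP'):
--                 # Append the count to the command and pad with a zero at the end if it's a single digit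
--                 # For 'FR', 'FL', 'BL', and 'BR', the count is always '00'
--                 if prev_command in ['FR', 'FL', 'BL', 'BR']:
--                     modified_action.append(f"{prev_command}00")
--                 else:
--                     if (count >= 10):
--                         # Append the first part of the count with  10 to the command
--                         modified_action.append(f"{prev_command}90")
--                         # Append the second part of the count with the remainder to the command
--                         modified_action.append(
--                             f"{prev_command}{count -  9}0")
--                     else:
--                         modified_action.append(
--                             f"{prev_command}{count}{'0' if count < 10 else ''}")
--             # If the previous command is 'SNAP' or 'STOP', append it without a count
--             elif prev_command is not None and (prev_command == 'STOP' or prev_command.startswith('SNAP')):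
--                 modified_action.append(prev_command)
--             # Reset the count and set the current command as the previous command
--             count = 1
--             prev_command = command
--
--     # Append the last command with its count to the modified action
--     if prev_command is not None and prev_command != 'STOP' and not prev_command.startswith('SNAP'):
--         # Append the count to the command and pad with a zero at the end if it's a single digit
--         # For 'FR', 'FL', 'BL', and 'BR', the count is always '00'
--         if prev_command in ['FR', 'FL', 'BL', 'BR']:
--             modified_action.append(f"{prev_command}00")
--         else:
--             if (count >= 10):
--                 # Append the first part of the count with  10 to the command
--                 modified_action.append(f"{prev_command}90")
--                 # Append the second part of the count with the remainder to the command
--                 modified_action.append(f"{prev_command}{count -  9}0")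
--             else:
--                 modified_action.append(
--                     f"{prev_command}{count}{'0' if count < 10 else ''}")
--     elif prev_command is not None and (prev_command == 'STOP' or prev_command.startswith('SNAP')):
--         modified_action.append(prev_command)
--
--     return modified_action
-- ===== SOURCE B (Python) =====
-- def count_repeated_commands(action):
--     # Pass 1: group the commands; only FW/BW runs merge, everything else starts a fresh group.
--     groups = []
--     for cmd in action:
--         if cmd in ('FW', 'BW') and groups and groups[-1][0] == cmd:
--             groups[-1][1] += 1
--         else:
--             groups.append([cmd, 1])
--     # Pass 2: format each group with one shared rule.
--     out = []
--     for cmd, n in groups: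
--         if cmd == 'STOP' or cmd.startswith('SNAP'):
--             out.append(cmd)
--         elif cmd in ('FR', 'FL', 'BL', 'BR'):
--             out.append(cmd + '00')
--         elif n >= 10:
--             out.append(cmd + '90')
--             out.append(cmd + str(n - 9) + '0')
--         else:
--             out.append(cmd + str(n) + '0')
--     return out
-- ===== Notes on version B (the rewrite author's own statement) =====
-- stated objective: simpler
-- what changed: Two clean passes instead of one loop with duplicated flush code: B first builds a list of (command, count) groups (only FW/BW runs merge), then formats every group with one shared rule, eliminating A's twice-written flush/format block.
import Mathlib
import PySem

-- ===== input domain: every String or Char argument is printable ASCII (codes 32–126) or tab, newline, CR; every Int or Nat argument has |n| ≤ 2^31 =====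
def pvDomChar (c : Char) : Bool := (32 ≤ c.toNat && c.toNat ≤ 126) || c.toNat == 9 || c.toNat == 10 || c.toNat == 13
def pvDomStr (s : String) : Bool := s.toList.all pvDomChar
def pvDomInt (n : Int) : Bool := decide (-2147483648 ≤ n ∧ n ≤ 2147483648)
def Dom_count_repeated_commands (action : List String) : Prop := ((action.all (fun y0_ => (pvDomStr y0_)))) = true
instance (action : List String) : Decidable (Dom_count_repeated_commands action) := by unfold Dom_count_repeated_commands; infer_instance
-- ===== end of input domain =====

-- B replaces A's single loop with its twice-duplicated flush block by two passes:
-- group into (command, count) pairs, then format each group with one shared rule (objective: simpler).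

-- ===== PORT A =====
-- loop body of A's for-loop (state = (modified_action, prev_command, count))
def pvStepA (st : List String × Option String × Int) (command : String) :
    List String × Option String × Int :=
  let modified_action := st.1
  let prev_command := st.2.1
  let count := st.2.2
  if (command = "FW" ∨ command = "BW") ∧ prev_command = some command then
    (modified_action, prev_command, count + 1)
  else
    let modified_action :=
      match prev_command with
      | none => modified_action
      | some p =>
        if p ≠ "STOP" ∧ ¬ (PySem.Str.startswith p "SNAP" = true) then
          if p = "FR" ∨ p = "FL" ∨ p = "BL" ∨ p = "BR" then
            modified_action ++ [p ++ "00"]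
          else if count ≥ 10 then
            modified_action ++ [p ++ "90", p ++ PySem.Int.toStr (count - 9) ++ "0"]
          else
            modified_action ++ [p ++ PySem.Int.toStr count ++ (if count < 10 then "0" else "")]
        else if p = "STOP" ∨ PySem.Str.startswith p "SNAP" = true then
          modified_action ++ [p]
        else
          modified_action
    (modified_action, some command, 1)

-- A's duplicated tail-flush code after the loop
def pvTailA (st : List String × Option String × Int) : List String :=
  match st.2.1 with
  | none => st.1
  | some p =>
    if p ≠ "STOP" ∧ ¬ (PySem.Str.startswith p "SNAP" = true) then
      if p = "FR" ∨ p = "FL" ∨ p = "BL" ∨ p = "BR" then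
        st.1 ++ [p ++ "00"]
      else if st.2.2 ≥ 10 then
        st.1 ++ [p ++ "90", p ++ PySem.Int.toStr (st.2.2 - 9) ++ "0"]
      else
        st.1 ++ [p ++ PySem.Int.toStr st.2.2 ++ (if st.2.2 < 10 then "0" else "")]
    else if p = "STOP" ∨ PySem.Str.startswith p "SNAP" = true then
      st.1 ++ [p]
    else
      st.1

def count_repeated_commands (action : List String) : List String :=
  pvTailA (action.foldl pvStepA ([], none, 0))

-- ===== PORT B =====
-- pass 1 of Source B: build groups (kept in reverse; groups[-1] is the head)
def pvGroupsRev (acc : List (String × Int)) : List String → List (String × Int)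
  | [] => acc
  | cmd :: rest =>
    match acc with
    | (p, n) :: tail =>
      if (cmd = "FW" ∨ cmd = "BW") ∧ p = cmd then pvGroupsRev ((p, n + 1) :: tail) rest
      else pvGroupsRev ((cmd, 1) :: (p, n) :: tail) rest
    | [] => pvGroupsRev [(cmd, 1)] rest

-- pass 2 of Source B: the shared formatting rule for one group
def pvFmt (g : String × Int) : List String :=
  if g.1 = "STOP" ∨ PySem.Str.startswith g.1 "SNAP" = true then [g.1]
  else if g.1 = "FR" ∨ g.1 = "FL" ∨ g.1 = "BL" ∨ g.1 = "BR" then [g.1 ++ "00"]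
  else if g.2 ≥ 10 then [g.1 ++ "90", g.1 ++ PySem.Int.toStr (g.2 - 9) ++ "0"]
  else [g.1 ++ PySem.Int.toStr g.2 ++ "0"]

def count_repeated_commands_alt (action : List String) : List String :=
  ((pvGroupsRev [] action).reverse).flatMap pvFmt

-- ===== PRECONDITION & SPEC =====
def Spec_count_repeated_commands (action : List String) (out : List String) : Prop := out = count_repeated_commands_alt action
instance (action : List String) (out : List String) : Decidable (Spec_count_repeated_commands action out) := by unfold Spec_count_repeated_commands; infer_instance

-- ===== CLAIM (what is proved, stated in full; the proofs are below) =====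
def Claim_equal_count_repeated_commands : Prop := ∀ (action : List String), Dom_count_repeated_commands action → Spec_count_repeated_commands action (count_repeated_commands action)

-- ===== LEMMAS AND PROOFS =====

-- the open group (p, n) followed by the rest of the input, as a forward list of groups
def pvCore (p : String) (n : Int) : List String → List (String × Int)
  | [] => [(p, n)]
  | x :: xs =>
    if (x = "FW" ∨ x = "BW") ∧ p = x then pvCore p (n + 1) xs
    else (p, n) :: pvCore x 1 xs

-- pvGroupsRev versus the forward pvCore
theorem pvGroupsRev_core (xs : List String) :
    ∀ (acc : List (String × Int)) (p : String) (n : Int),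
      (pvGroupsRev ((p, n) :: acc) xs).reverse = acc.reverse ++ pvCore p n xs := by
  induction xs with
  | nil => intro acc p n; simp [pvGroupsRev, pvCore]
  | cons x xs ih =>
    intro acc p n
    by_cases h : (x = "FW" ∨ x = "BW") ∧ p = x
    · simp [pvGroupsRev, pvCore, h, ih]
    · simp [pvGroupsRev, pvCore, h, ih]

-- A's tail-flush of an open group is B's shared formatting rule
theorem pvTailA_fmt (acc : List String) (p : String) (n : Int) :
    pvTailA (acc, some p, n) = acc ++ pvFmt (p, n) := by
  unfold pvTailA pvFmt
  by_cases h1 : p = "STOP" ∨ PySem.Str.startswith p "SNAP" = true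
  · have h1' : ¬ (p ≠ "STOP" ∧ ¬ (PySem.Str.startswith p "SNAP" = true)) := by tauto
    simp only [h1, h1', if_true, if_false]
  · have h1' : p ≠ "STOP" ∧ ¬ (PySem.Str.startswith p "SNAP" = true) := by tauto
    have hsw : PySem.Chars.startswith p.toList ['S','N','A','P'] = false := by
      simpa using h1'.2
    by_cases h2 : p = "FR" ∨ p = "FL" ∨ p = "BL" ∨ p = "BR"
    · simp [h1', h2, hsw]
    · by_cases h3 : (n : Int) ≥ 10
      · simp [h1', h2, h3, hsw]
      · have h4 : n < 10 := by omega
        simp [h1', h2, h3, h4, hsw]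

theorem pvTailA_append (acc : List String) (pr : Option String) (n : Int) :
    pvTailA (acc, pr, n) = acc ++ pvTailA ([], pr, n) := by
  cases pr with
  | none => simp [pvTailA]
  | some p => simp [pvTailA_fmt]

-- the flush inside pvStepA's else-branch IS pvTailA of the incoming state
theorem pvStepA_nonmerge (acc : List String) (pr : Option String) (n : Int) (c : String)
    (h : ¬ ((c = "FW" ∨ c = "BW") ∧ pr = some c)) :
    pvStepA (acc, pr, n) c = (pvTailA (acc, pr, n), some c, 1) := by
  cases pr <;> simp only [pvStepA, pvTailA, h, if_false]

theorem pvStepA_merge (acc : List String) (pr : Option String) (n : Int) (c : String)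
    (h : (c = "FW" ∨ c = "BW") ∧ pr = some c) :
    pvStepA (acc, pr, n) c = (acc, pr, n + 1) := by
  simp [pvStepA, h]

-- the accumulator only grows on the right: it can be pulled out of the loop
theorem pvFoldA_append (xs : List String) :
    ∀ (acc : List String) (pr : Option String) (n : Int),
      pvTailA (xs.foldl pvStepA (acc, pr, n)) = acc ++ pvTailA (xs.foldl pvStepA ([], pr, n)) := by
  induction xs with
  | nil => intro acc pr n; simpa using pvTailA_append acc pr n
  | cons x xs ih =>
    intro acc pr n
    by_cases h : (x = "FW" ∨ x = "BW") ∧ pr = some x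
    · rw [List.foldl_cons, List.foldl_cons, pvStepA_merge _ _ _ _ h, pvStepA_merge _ _ _ _ h]
      exact ih acc pr (n + 1)
    · rw [List.foldl_cons, List.foldl_cons, pvStepA_nonmerge _ _ _ _ h,
        pvStepA_nonmerge _ _ _ _ h, ih (pvTailA (acc, pr, n)), ih (pvTailA ([], pr, n)),
        pvTailA_append acc pr n, List.append_assoc]

-- main loop invariant: A's loop from an open group (p, n) produces B's formatted groups
theorem pvMain (xs : List String) :
    ∀ (p : String) (n : Int),
      pvTailA (xs.foldl pvStepA ([], some p, n)) = (pvCore p n xs).flatMap pvFmt := by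
  induction xs with
  | nil => intro p n; simp [pvCore, pvTailA_fmt]
  | cons x xs ih =>
    intro p n
    by_cases h : (x = "FW" ∨ x = "BW") ∧ p = x
    · obtain ⟨hfw, rfl⟩ := h
      rw [List.foldl_cons, pvStepA_merge _ _ _ _ ⟨hfw, rfl⟩, ih]
      simp [pvCore, hfw]
    · have h' : ¬ ((x = "FW" ∨ x = "BW") ∧ (some p : Option String) = some x) := by
        simp only [Option.some.injEq]; tauto
      simp only [List.foldl_cons, pvStepA_nonmerge _ _ _ _ h', pvTailA_fmt,
        List.nil_append, pvFoldA_append, ih, pvCore, h, if_false, List.flatMap_cons]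

-- ===== VERDICT (by name: the statement is the Claim_ definition above) =====
theorem count_repeated_commands_spec : Claim_equal_count_repeated_commands := by
  intro action _
  unfold Spec_count_repeated_commands count_repeated_commands count_repeated_commands_alt
  cases action with
  | nil => rfl
  | cons x xs =>
    have hstep : pvStepA ([], none, 0) x = ([], some x, 1) := by
      simp [pvStepA]
    have hg : (pvGroupsRev [] (x :: xs)).reverse = pvCore x 1 xs := by
      simpa using pvGroupsRev_core xs [] x 1
    simp only [List.foldl_cons, hstep, pvMain, hg]
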